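-- pv_equiv track=rewrite | github.com/kilogram/rock-paper-sync | src/rock_paper_sync/annotations/scene_adapter/executor.py | _compute_anchor_delta
-- ===== SOURCE A (Python) =====
-- def _compute_anchor_delta(old_text: str, new_text: str) -> int:
--     """Compute anchor offset delta between old and new text.
--
--     This enables delta-based reanchoring, which preserves the relative
--     spacing between multiple strokes in a cluster.
--
--     The delta is computed by finding where the content shifted.
--     For now, use a simple length-based delta.
--
--     Args:
--         old_text: Original page text
--         new_text: New page text
--
--     Returns:
--         Delta to add to all anchor offsets
--     """
--     # Simple heuristic: if text was inserted at the beginning,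
--     # anchors need to shift by the difference
--     # This is a simplified version - the full generator has more sophisticated logic
--     if not old_text or not new_text:
--         return 0
--
--     # Find common prefix to detect where changes start
--     common_prefix = 0
--     for i, (old_char, new_char) in enumerate(zip(old_text, new_text)):
--         if old_char != new_char:
--             break
--         common_prefix = i + 1
--
--     # If content was inserted before the common prefix, delta is positive
--     # If content was deleted, delta is negative
--     len_diff = len(new_text) - len(old_text)
--
--     # Only apply delta if changes occurred before the end of old text
--     if common_prefix < len(old_text):
--         return len_diff
--
--     return 0
-- ===== SOURCE B (Python) =====
-- def _compute_anchor_delta(old_text: str, new_text: str) -> int: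
--     """Recursive decomposition: strip matching leading characters; no index
--     or prefix-length counter is maintained."""
--     if not old_text or not new_text:
--         return 0
--     return _strip(old_text, new_text, len(new_text) - len(old_text))
--
--
-- def _strip(old: str, new: str, delta: int) -> int:
--     if not old:
--         return 0          # old fully consumed: old was a prefix of new
--     if not new or old[0] != new[0]:
--         return delta      # changes reach into old text
--     return _strip(old[1:], new[1:], delta)
-- ===== Notes on version B (the rewrite author's own statement) =====
-- stated objective: alternative
-- what changed: Replaces A's indexed enumerate-over-zip loop that maintains a common-prefix length and finally compares it with len(old_text) by a recursion that strips equal leading characters from both strings, carrying the precomputed length delta and returning directly at the first mismatch or when a string is exhausted - no index and no prefix count exist.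
import Mathlib
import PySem

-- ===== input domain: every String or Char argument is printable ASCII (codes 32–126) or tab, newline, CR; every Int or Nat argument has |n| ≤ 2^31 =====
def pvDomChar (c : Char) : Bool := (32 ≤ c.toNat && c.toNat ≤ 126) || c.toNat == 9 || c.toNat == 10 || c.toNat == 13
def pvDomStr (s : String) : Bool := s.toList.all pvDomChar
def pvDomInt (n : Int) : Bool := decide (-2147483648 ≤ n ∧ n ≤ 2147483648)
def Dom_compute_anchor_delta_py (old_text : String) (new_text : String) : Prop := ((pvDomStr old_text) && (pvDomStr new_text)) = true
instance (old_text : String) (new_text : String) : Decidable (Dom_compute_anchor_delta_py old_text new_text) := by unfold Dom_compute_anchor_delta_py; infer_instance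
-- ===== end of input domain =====

-- B replaces A's indexed prefix-length-counting loop (count compared with len(old) at
-- the end) by a recursion stripping equal leading characters, carrying the length delta.

-- ===== PORT A =====
-- the 'for i, (old_char, new_char) in enumerate(zip(...))' loop with break;
-- i is the enumerate index, cp the running common_prefix
def pvPrefLoop : List (Char × Char) → Nat → Nat → Nat
  | [], _, cp => cp
  | (a, b) :: rest, i, cp => if a ≠ b then cp else pvPrefLoop rest (i + 1) (i + 1)

def compute_anchor_delta_py (old_text : String) (new_text : String) : Int :=
  if old_text = "" ∨ new_text = "" then 0
  else
    let common_prefix := pvPrefLoop (old_text.toList.zip new_text.toList) 0 0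
    let len_diff : Int := (PySem.Str.len new_text : Int) - (PySem.Str.len old_text : Int)
    if common_prefix < PySem.Str.len old_text then len_diff else 0

-- ===== PORT B =====
-- B's helper _strip: recursion on both character lists simultaneously
def pvStrip : List Char → List Char → Int → Int
  | [], _, _ => 0
  | _ :: _, [], d => d
  | a :: xs, b :: ys, d => if a ≠ b then d else pvStrip xs ys d

def compute_anchor_delta_py_alt (old_text : String) (new_text : String) : Int :=
  if old_text = "" ∨ new_text = "" then 0
  else pvStrip old_text.toList new_text.toList
        ((PySem.Str.len new_text : Int) - (PySem.Str.len old_text : Int))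

-- ===== PRECONDITION & SPEC =====
def Spec_compute_anchor_delta_py (old_text : String) (new_text : String) (out : Int) : Prop := out = compute_anchor_delta_py_alt old_text new_text
instance (old_text : String) (new_text : String) (out : Int) : Decidable (Spec_compute_anchor_delta_py old_text new_text out) := by unfold Spec_compute_anchor_delta_py; infer_instance

-- ===== CLAIM (what is proved, stated in full; the proofs are below) =====
def Claim_equal_compute_anchor_delta_py : Prop := ∀ (old_text : String) (new_text : String), Dom_compute_anchor_delta_py old_text new_text → Spec_compute_anchor_delta_py old_text new_text (compute_anchor_delta_py old_text new_text)

-- ===== LEMMAS AND PROOFS =====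

-- length of the common prefix of two char lists
def pvCnt : List Char → List Char → Nat
  | a :: xs, b :: ys => if a = b then pvCnt xs ys + 1 else 0
  | _, _ => 0

theorem pvPrefLoop_eq : ∀ (xs ys : List Char) (i : Nat),
    pvPrefLoop (xs.zip ys) i i = i + pvCnt xs ys := by
  intro xs
  induction xs with
  | nil => intro ys i; simp [pvPrefLoop, pvCnt]
  | cons a xs ih =>
    intro ys i
    cases ys with
    | nil => simp [pvPrefLoop, pvCnt]
    | cons b ys =>
      by_cases h : a = b
      · simp [pvPrefLoop, pvCnt, h, ih ys (i + 1)]; omega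
      · simp [pvPrefLoop, pvCnt, h]

-- B's strip recursion returns d exactly when the common prefix stops inside xs
theorem pvStrip_eq : ∀ (xs ys : List Char) (d : Int),
    pvStrip xs ys d = if pvCnt xs ys < xs.length then d else 0 := by
  intro xs
  induction xs with
  | nil => intro ys d; simp [pvStrip, pvCnt]
  | cons a xs ih =>
    intro ys d
    cases ys with
    | nil => simp [pvStrip, pvCnt]
    | cons b ys =>
      by_cases h : a = b
      · subst h
        rw [show pvStrip (a :: xs) (a :: ys) d = pvStrip xs ys d from by simp [pvStrip],
          show pvCnt (a :: xs) (a :: ys) = pvCnt xs ys + 1 from by simp [pvCnt], ih,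
          List.length_cons]
        split_ifs <;> first | rfl | omega
      · simp [pvStrip, pvCnt, h]

-- ===== VERDICT (by name: the statement is the Claim_ definition above) =====
theorem compute_anchor_delta_py_spec : Claim_equal_compute_anchor_delta_py := by
  intro old_text new_text _
  unfold Spec_compute_anchor_delta_py compute_anchor_delta_py compute_anchor_delta_py_alt
  by_cases he : old_text = "" ∨ new_text = ""
  · simp [he]
  · simp only [he, if_false]
    rw [pvPrefLoop_eq, pvStrip_eq]
    simp [PySem.Str.len_eq]
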